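-- pv_equiv track=rewrite | github.com/mota-abiram/AdPilot-V3-Complete-Final | ads_agent/meta_ads_agent_v2.py | get_action_value
-- ===== SOURCE A (Python) =====
-- def si(val, default=0):
--     try:
--         return int(val)
--     except (TypeError, ValueError):
--         return default
--
-- def get_action_value(actions, types):
--     if not actions:
--         return 0
--     for t in types:
--         for a in actions:
--             if a.get("action_type") == t:
--                 return si(a.get("value", 0))
--     return 0
-- ===== SOURCE B (Python) =====
-- def si(val, default=0):
--     try:
--         return int(val)
--     except (TypeError, ValueError):
--         return default
--
-- def get_action_value(actions, types):
--     # Build an index: action_type -> si(value) of its FIRST occurrence.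
--     d = {}
--     for a in (actions or []):
--         k = a.get("action_type")
--         if k is not None and k not in d:
--             d[k] = si(a.get("value", 0))
--     for t in types:
--         if t in d:
--             return d[t]
--     return 0
-- ===== Notes on version B (the rewrite author's own statement) =====
-- stated objective: faster
-- what changed: B builds a dict index from action_type to si(value) of its first occurrence in one pass over actions, then scans the priority types once, instead of A's rescanning the whole actions list for every type.
import Mathlib
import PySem

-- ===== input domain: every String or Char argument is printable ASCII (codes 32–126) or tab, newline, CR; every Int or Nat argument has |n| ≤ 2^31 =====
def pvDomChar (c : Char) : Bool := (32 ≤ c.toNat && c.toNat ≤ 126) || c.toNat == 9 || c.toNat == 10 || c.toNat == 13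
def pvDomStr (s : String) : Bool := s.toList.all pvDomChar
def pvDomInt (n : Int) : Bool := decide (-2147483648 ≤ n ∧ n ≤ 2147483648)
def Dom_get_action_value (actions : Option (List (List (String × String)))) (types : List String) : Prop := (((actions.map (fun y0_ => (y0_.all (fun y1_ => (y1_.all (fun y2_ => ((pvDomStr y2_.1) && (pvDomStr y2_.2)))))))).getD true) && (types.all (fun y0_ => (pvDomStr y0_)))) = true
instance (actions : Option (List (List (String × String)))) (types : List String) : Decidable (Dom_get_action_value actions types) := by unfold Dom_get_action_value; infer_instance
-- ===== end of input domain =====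

-- B replaces A's per-type rescan of the actions list by a dict index (action_type -> si(value)
-- of its first occurrence) built in one pass, then a single pass over the priority types.

-- ===== PORT A =====
-- shared module helper: si(val) where val is a.get("value", 0), i.e. a string or the int 0 (none here)
def pySi (val : Option String) : Int :=
  match val with
  | some s => (PySem.Int.ofStr? s).getD 0   -- int(s); ValueError -> default 0
  | none => 0                                -- int(0) = 0

-- a.get("action_type") / a.get("value") on the Python dict built from the pair list
def pyGetAT (a : List (String × String)) : Option String :=
  (PySem.Dict.ofList a).get? "action_type"
def pyGetVal (a : List (String × String)) : Option String :=
  (PySem.Dict.ofList a).get? "value"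

-- the outer 'for t in types' loop; the inner 'for a in actions' loop is the first match
def loopA (acts : List (List (String × String))) : List String → Int
  | [] => 0
  | t :: ts =>
    match acts.find? (fun a => pyGetAT a == some t) with
    | some a => pySi (pyGetVal a)
    | none => loopA acts ts

def get_action_value (actions : Option (List (List (String × String)))) (types : List String) : Int :=
  match actions with
  | none => 0                       -- 'if not actions'
  | some acts => if acts.isEmpty then 0 else loopA acts types

-- ===== PORT B =====
-- one pass over the actions: index action_type -> si(value) of its first occurrence
def buildIdx (acts : List (List (String × String))) : PySem.Dict String Int :=
  acts.foldl
    (fun d a =>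
      match pyGetAT a with
      | some k => if d.contains k then d else d.insert k (pySi (pyGetVal a))
      | none => d)
    PySem.Dict.empty

-- one pass over the priority types
def lookupB (d : PySem.Dict String Int) : List String → Int
  | [] => 0
  | t :: ts =>
    match d.get? t with
    | some v => v
    | none => lookupB d ts

def get_action_value_alt (actions : Option (List (List (String × String)))) (types : List String) : Int :=
  lookupB (buildIdx (actions.getD [])) types

-- ===== PRECONDITION & SPEC =====
def Spec_get_action_value (actions : Option (List (List (String × String)))) (types : List String) (out : Int) : Prop := out = get_action_value_alt actions types
instance (actions : Option (List (List (String × String)))) (types : List String) (out : Int) : Decidable (Spec_get_action_value actions types out) := by unfold Spec_get_action_value; infer_instance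

-- ===== CLAIM (what is proved, stated in full; the proofs are below) =====
def Claim_equal_get_action_value : Prop := ∀ (actions : Option (List (List (String × String)))) (types : List String), Dom_get_action_value actions types → Spec_get_action_value actions types (get_action_value actions types)

-- ===== LEMMAS AND PROOFS =====

-- the index lookup is exactly A's inner first-match scan (invariant over the foldl accumulator)
theorem buildIdx_get_inv (acts : List (List (String × String))) :
    ∀ (d : PySem.Dict String Int) (t : String),
      (acts.foldl
        (fun d a =>
          match pyGetAT a with
          | some k => if d.contains k then d else d.insert k (pySi (pyGetVal a))
          | none => d)
        d).get? t =
      match d.get? t with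
      | some v => some v
      | none => (acts.find? (fun a => pyGetAT a == some t)).map (fun a => pySi (pyGetVal a)) := by
  induction acts with
  | nil => intro d t; simp; cases d.get? t <;> simp
  | cons a acts ih =>
    intro d t
    simp only [List.foldl_cons, List.find?_cons]
    cases hAT : pyGetAT a with
    | none =>
      rw [ih]; simp
    | some k =>
      by_cases hkt : k = t
      · subst hkt
        by_cases hc : d.contains k = true
        · rcases hg : d.get? k with _ | v
          · exact absurd hg (by simpa [PySem.Dict.get?_eq_none_iff_contains] using hc)
          · simp [hc, ih, hg]
        · simp only [Bool.not_eq_true] at hc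
          have hg : d.get? k = none := by
            rw [PySem.Dict.get?_eq_none_iff_contains, hc]
          simp [hc, ih, PySem.Dict.get?_insert_self, hg]
      · have hb : (k == t) = false := by simp [hkt]
        by_cases hc : d.contains k = true
        · simp [hc, ih, hb]
        · simp only [Bool.not_eq_true] at hc
          simp [hc, ih, PySem.Dict.get?_insert_of_ne _ _ (Ne.symm hkt), hb]

theorem buildIdx_get (acts : List (List (String × String))) (t : String) :
    (buildIdx acts).get? t
      = (acts.find? (fun a => pyGetAT a == some t)).map (fun a => pySi (pyGetVal a)) := by
  rw [buildIdx, buildIdx_get_inv]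
  simp [PySem.Dict.get?_empty]

theorem loopA_eq_lookupB (acts : List (List (String × String))) (types : List String) :
    loopA acts types = lookupB (buildIdx acts) types := by
  induction types with
  | nil => rfl
  | cons t ts ih =>
    simp only [loopA, lookupB, buildIdx_get]
    cases acts.find? (fun a => pyGetAT a == some t) <;> simp [ih]

theorem lookupB_empty_zero (types : List String) :
    lookupB PySem.Dict.empty types = 0 := by
  induction types with
  | nil => rfl
  | cons t ts ih => simp [lookupB, PySem.Dict.get?_empty, ih]

-- ===== VERDICT (by name: the statement is the Claim_ definition above) =====
theorem get_action_value_spec : Claim_equal_get_action_value := by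
  intro actions types _
  unfold Spec_get_action_value get_action_value get_action_value_alt
  cases actions with
  | none => simp [buildIdx, lookupB_empty_zero]
  | some acts =>
    cases acts with
    | nil => simp [buildIdx, lookupB_empty_zero]
    | cons a as => simp [List.isEmpty, loopA_eq_lookupB]
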